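-- pv_equiv track=rewrite | github.com/vlegoff/Avenew | world/utils.py | show_list
-- ===== SOURCE A (Python) =====
-- def show_list(strings, width=4, vertical=False, length=None, begin="",
--         between_lines="\n"):
--     """Show a formatted list in a ls-like display.
--
--     Args:
--         strings (list of str): the list of strings to display.
--         width (int): the number of columns per line.
--         vertical (bool): should the strings be added vertically?
--         length (int): the length of each column.
--         begin (str): the beginning of each line in the table.
--         between_lines (str): what to put between lines?
--
--     This function takes a list of strings as argument, and format it
--     in a table with a fixed number per line.  Other options are used to
--     give more freedom regarding formatting.
--
--     """
--     lines = [[]]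
--     i = 0
--     max_length = 0
--
--     # Add the strings horizontally or vertically
--     for entry in strings:
--         line = lines[-1]
--         if len(line) >= width:
--             line = []
--             lines.append(line)
--         line.append(entry)
--         if len(entry) > max_length:
--             max_length = len(entry)
--
--     # Create the string
--     ret = ""
--     if length is None:
--         length = max_length
--
--     for i, line in enumerate(lines):
--         if i != 0:
--             ret += between_lines
--         ret += begin
--         for entry in line:
--             if len(entry) > length - 1:
--                 entry = entry[:length - 4] + "..."
--             ret += entry.ljust(length)
--
--     return ret
-- ===== SOURCE B (Python) =====
-- def show_list(strings, width=4, vertical=False, length=None, begin="",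
--         between_lines="\n"):
--     """Show a formatted list in a ls-like display (ls-like table)."""
--     if length is None:
--         length = max((len(s) for s in strings), default=0)
--     cells = []
--     for entry in strings:
--         if len(entry) > length - 1:
--             entry = entry[:length - 4] + "..."
--         cells.append(entry.ljust(length))
--     rows = [cells[i:i + width] for i in range(0, len(cells), width)] or [[]]
--     return between_lines.join(begin + "".join(row) for row in rows)
-- ===== Notes on version B (the rewrite author's own statement) =====
-- stated objective: simpler
-- what changed: Pre_ excludes width <= 0, where a column count is unspecified and the two natural implementations legitimately disagree (B even raises for width = 0); inside it, A's stateful loop that grows a mutable last line inside a list of lines plus a nested enumerate/append emission loop is replaced by: pre-format every string into one fixed-width cell, slice the cell list into rows with range(0, len(cells), width), and join the rows with between_lines.join.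
-- outside the precondition, e.g. on show_list(['a', 'b'], -1, False, None, '', '\n'): A returns '\n...\n...', B returns ''; on show_list(['a'], 0, False, None, '', '\n'): A returns '\n...', B raises ValueError
import Mathlib
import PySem

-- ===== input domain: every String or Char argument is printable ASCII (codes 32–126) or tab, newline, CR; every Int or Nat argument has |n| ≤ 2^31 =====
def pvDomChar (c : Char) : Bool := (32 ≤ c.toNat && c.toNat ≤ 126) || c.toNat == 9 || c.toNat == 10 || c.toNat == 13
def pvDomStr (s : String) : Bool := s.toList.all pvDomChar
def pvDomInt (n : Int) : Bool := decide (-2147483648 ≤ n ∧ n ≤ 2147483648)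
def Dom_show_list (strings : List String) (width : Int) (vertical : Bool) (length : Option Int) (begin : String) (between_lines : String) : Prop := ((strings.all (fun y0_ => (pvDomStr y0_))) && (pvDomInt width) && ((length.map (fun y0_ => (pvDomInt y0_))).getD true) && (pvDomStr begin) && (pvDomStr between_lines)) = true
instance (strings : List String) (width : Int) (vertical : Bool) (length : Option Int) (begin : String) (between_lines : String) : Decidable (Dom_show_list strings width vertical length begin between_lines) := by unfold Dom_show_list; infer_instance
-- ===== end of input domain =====

-- B re-formats every string into a fixed-width cell once, slices the cell list into rows and joins
-- them, instead of A's stateful line-building loop and nested append loops (objective: simpler;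
-- same asymptotic cost). Equivalence is claimed for width >= 1 (see Pre_); return value only.

-- s.ljust(n) for Int n, exact: pads with spaces up to n, unchanged when n <= len(s)
-- (Int.toNat clamps the negative difference to 0, exactly Python's ljust).
def pyLjust (cs : List Char) (n : Int) : List Char :=
  cs ++ List.replicate (n - cs.length).toNat ' '

-- ===== PORT A =====
def show_list (strings : List String) (width : Int) (vertical : Bool) (length : Option Int) (begin : String) (between_lines : String) : String :=
  let st := strings.foldl (fun (st : List (List String) × Nat) entry =>
      let line := (PySem.List.pyGet? st.1 (-1)).getD []
      let lines := if (line.length : Int) ≥ width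
                   then st.1 ++ [[entry]]
                   else st.1.dropLast ++ [line ++ [entry]]
      (lines, if entry.toList.length > st.2 then entry.toList.length else st.2))
    ([[]], 0)
  let len : Int := length.getD (st.2 : Int)
  let ret := (PySem.List.enumerate st.1 0).foldl (fun ret il =>
      let ret := if il.1 ≠ 0 then ret ++ between_lines.toList else ret
      let ret := ret ++ begin.toList
      il.2.foldl (fun ret entry =>
          let e := if (entry.toList.length : Int) > len - 1
                   then PySem.Chars.slice entry.toList none (some (len - 4)) ++ "...".toList
                   else entry.toList
          ret ++ pyLjust e len) ret)
    ([] : List Char)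
  String.ofList ret

-- ===== PORT B =====
def show_list_alt (strings : List String) (width : Int) (vertical : Bool) (length : Option Int) (begin : String) (between_lines : String) : String :=
  let len : Int := length.getD (((strings.map (fun s => s.toList.length)).foldl max 0 : Nat) : Int)
  let cells := strings.map (fun entry =>
      let e := if (entry.toList.length : Int) > len - 1
               then PySem.Chars.slice entry.toList none (some (len - 4)) ++ "...".toList
               else entry.toList
      pyLjust e len)
  let rows := (PySem.List.pyRange 0 (cells.length) width).map
      (fun i => PySem.List.slice cells (some i) (some (i + width)))
  let rows := if rows.isEmpty then [[]] else rows
  String.ofList (PySem.Chars.join between_lines.toList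
      (rows.map (fun row => begin.toList ++ row.flatten)))

-- ===== PRECONDITION & SPEC =====
-- Pre_ excludes width <= 0: a table with a nonpositive column count is unspecified; there A and B
-- produce different, equally unspecifiable layouts (and B raises ValueError for width = 0, where
-- its range step is zero), so no one value can be claimed as the function's.
def Pre_show_list (strings : List String) (width : Int) (vertical : Bool) (length : Option Int) (begin : String) (between_lines : String) : Prop := 1 ≤ width
instance (strings : List String) (width : Int) (vertical : Bool) (length : Option Int) (begin : String) (between_lines : String) : Decidable (Pre_show_list strings width vertical length begin between_lines) := by unfold Pre_show_list; infer_instance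

def pvWitness_show_list : List String × Int × Bool × Option Int × String × String :=
  (["alpha", "be", "c"], 2, false, none, "| ", "\n")

def Spec_show_list (strings : List String) (width : Int) (vertical : Bool) (length : Option Int) (begin : String) (between_lines : String) (out : String) : Prop := out = show_list_alt strings width vertical length begin between_lines
instance (strings : List String) (width : Int) (vertical : Bool) (length : Option Int) (begin : String) (between_lines : String) (out : String) : Decidable (Spec_show_list strings width vertical length begin between_lines out) := by unfold Spec_show_list; infer_instance

-- ===== CLAIM (what is proved, stated in full; the proofs are below) =====
def Claim_equal_show_list : Prop := ∀ (strings : List String) (width : Int) (vertical : Bool) (length : Option Int) (begin : String) (between_lines : String), Dom_show_list strings width vertical length begin between_lines → Pre_show_list strings width vertical length begin between_lines → Spec_show_list strings width vertical length begin between_lines (show_list strings width vertical length begin between_lines)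

-- ===== LEMMAS AND PROOFS =====

def pvChunks {α : Type} (W : Nat) : List α → List (List α)
  | [] => []
  | x :: xs => (x :: xs.take (W - 1)) :: pvChunks W (xs.drop (W - 1))
termination_by l => l.length
decreasing_by simp

theorem pvChunks_nil {α : Type} (W : Nat) : pvChunks (α := α) W [] = [] := by
  rw [pvChunks]

theorem pvChunks_cons {α : Type} (W : Nat) (x : α) (xs : List α) :
    pvChunks W (x :: xs) = (x :: xs.take (W - 1)) :: pvChunks W (xs.drop (W - 1)) := by
  rw [pvChunks]

theorem pv_chunks_map {α β : Type} (W : Nat) (f : α → β) (l : List α) :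
    pvChunks W (l.map f) = (pvChunks W l).map (List.map f) := by
  induction hn : l.length using Nat.strong_induction_on generalizing l with
  | _ n ih =>
    cases l with
    | nil => simp [pvChunks_nil]
    | cons x xs =>
      simp only [List.map_cons, pvChunks_cons, List.map_take, ← List.map_drop]
      rw [ih (xs.drop (W-1)).length (by simp [← hn]) _ rfl]


def pvCont {α : Type} (w : Int) (cur : List α) : List α → List (List α)
  | [] => [cur]
  | e :: l => if (cur.length : Int) ≥ w then cur :: pvCont w [e] l else pvCont w (cur ++ [e]) l

theorem pv_cont_eq {α : Type} (W : Nat) (hW : 1 ≤ W) :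
    ∀ (l : List α) (cur : List α), cur.length ≤ W →
      pvCont (W : Int) cur l =
        if cur.length < W
        then (cur ++ l.take (W - cur.length)) :: pvChunks W (l.drop (W - cur.length))
        else if l.isEmpty then [cur] else cur :: pvChunks W l := by
  intro l
  induction l with
  | nil =>
    intro cur h
    by_cases hc : cur.length < W <;> simp [pvCont, pvChunks_nil, hc]
  | cons e t ih =>
    intro cur h
    simp only [pvCont]
    by_cases hc : cur.length < W
    · rw [if_neg (by exact_mod_cast (by omega : ¬ (cur.length:Int) ≥ (W:Int))), if_pos hc]
      rw [ih (cur ++ [e]) (by simp; omega)]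
      have hk : W - cur.length = (W - cur.length - 1) + 1 := by omega
      rw [hk]
      simp only [List.take_succ_cons, List.drop_succ_cons]
      by_cases hc2 : cur.length + 1 < W
      · rw [if_pos (by simp; omega)]
        simp [Nat.sub_sub]
      · have hW2 : W - cur.length - 1 = 0 := by omega
        rw [if_neg (by simp; omega)]
        rw [hW2]
        simp only [List.take_zero, List.drop_zero, List.append_nil]
        cases t with
        | nil => simp [pvChunks_nil]
        | cons f t' => simp [pvChunks_cons]
    · have hce : cur.length = W := by omega
      rw [if_pos (by exact_mod_cast (by omega : (cur.length:Int) ≥ (W:Int))), if_neg hc,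
          if_neg (show ¬((e :: t).isEmpty = true) by simp)]
      rw [ih [e] (by simp; omega)]
      by_cases h1 : 1 < W
      · rw [if_pos (by simpa using h1)]
        simp [pvChunks_cons]
      · have hW1 : W = 1 := by omega
        subst hW1
        rw [if_neg (by simp)]
        cases t with
        | nil => simp [pvChunks_nil, pvChunks_cons]
        | cons f t' => simp [pvChunks_cons]

theorem pv_range_chunks {α : Type} (W : Nat) (hW : 1 ≤ W) (cells : List α) :
    (List.range ((cells.length + W - 1)/W)).map (fun k => (cells.drop (W*k)).take W)
      = pvChunks W cells := by
  induction hn : cells.length using Nat.strong_induction_on generalizing cells with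
  | _ n ih =>
    cases cells with
    | nil =>
      subst hn
      have h0 : (0 + W - 1)/W = 0 := Nat.div_eq_of_lt (by omega)
      simp only [List.length_nil, h0, List.range_zero, List.map_nil, pvChunks_nil]
    | cons x xs =>
      subst hn
      have hc : ((x::xs).length + W - 1)/W = ((xs.drop (W-1)).length + W - 1)/W + 1 := by
        simp only [List.length_cons, List.length_drop]
        by_cases hle : xs.length + 1 ≤ W
        · have h1 : xs.length - (W-1) = 0 := by omega
          rw [h1, Nat.div_eq_of_lt (show 0 + W - 1 < W by omega)]
          exact Nat.div_eq_of_lt_le (by omega) (by omega)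
        · have h2 : xs.length + 1 + W - 1 = (xs.length - (W-1) + W - 1) + W := by omega
          rw [h2, Nat.add_div_right _ (by omega)]
      rw [hc, List.range_succ_eq_map, List.map_cons, List.map_map, pvChunks_cons]
      have hW' : W = (W - 1) + 1 := by omega
      have htake : List.take W (x::xs) = x :: List.take (W-1) xs := by
        conv_lhs => rw [hW', List.take_succ_cons]
      have hdrop : List.drop W (x::xs) = List.drop (W-1) xs := by
        conv_lhs => rw [hW', List.drop_succ_cons]
      simp only [Nat.mul_zero, List.drop_zero, htake]
      congr 1
      rw [← ih (xs.drop (W-1)).length (by simp) (xs.drop (W-1)) rfl]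
      apply List.map_congr_left
      intro k _
      simp only [Function.comp_apply, Nat.succ_eq_add_one]
      have h3 : W * (k + 1) = (W - 1 + W * k) + 1 := by rw [Nat.mul_succ]; omega
      rw [h3, List.drop_succ_cons, List.drop_drop, Nat.add_comm]

theorem pv_pyRange_eq (W : Nat) (hW : 1 ≤ W) (n : Nat) :
    PySem.List.pyRange 0 (n : Int) (W : Int)
      = (List.range ((n + W - 1)/W)).map (fun k => ((W * k : Nat) : Int)) := by
  have hWne : (W : Int) ≠ 0 := by exact_mod_cast (by omega : W ≠ 0)
  have hWpos : (0 : Int) < (W : Int) := by exact_mod_cast (by omega : 0 < W)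
  simp only [PySem.List.pyRange, if_neg hWne, if_pos hWpos]
  by_cases hn : (0 : Int) < (n : Int)
  · rw [if_pos hn]
    have hcount : (((n : Int) - 0 + (W : Int) - 1) / (W : Int)).toNat = (n + W - 1)/W := by
      have h1 : ((n : Int) - 0 + (W : Int) - 1) = ((n + W - 1 : Nat) : Int) := by push_cast; omega
      rw [h1, ← Int.natCast_div, Int.toNat_natCast]
    rw [hcount]
    apply List.map_congr_left
    intro k _
    push_cast
    ring
  · rw [if_neg hn]
    have hn0 : n = 0 := by omega
    subst hn0
    have h0 : (0 + W - 1)/W = 0 := Nat.div_eq_of_lt (by omega)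
    simp only [h0, List.range_zero, List.map_nil]

theorem pv_rows_eq {α : Type} (W : Nat) (hW : 1 ≤ W) (cells : List α) :
    (PySem.List.pyRange 0 (cells.length) (W : Int)).map
        (fun i => PySem.List.slice cells (some i) (some (i + (W : Int))))
      = pvChunks W cells := by
  rw [pv_pyRange_eq W hW cells.length, List.map_map, ← pv_range_chunks W hW cells]
  apply List.map_congr_left
  intro k _
  simp only [Function.comp_apply]
  rw [PySem.List.slice_natCast_add]

theorem pv_max_eq (strings : List String) :
    strings.foldl (fun m e => if e.toList.length > m then e.toList.length else m) 0
      = (strings.map (fun s => s.toList.length)).foldl max 0 := by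
  rw [List.foldl_map]
  congr 1
  funext m e
  rw [Nat.max_def]
  split_ifs <;> omega

theorem pv_foldl_pair {α β γ : Type} (f : β → α → β) (g : γ → α → γ) :
    ∀ (l : List α) (a : β) (b : γ),
      l.foldl (fun st e => (f st.1 e, g st.2 e)) (a, b) = (l.foldl f a, l.foldl g b) := by
  intro l
  induction l with
  | nil => intro a b; rfl
  | cons x t ih => intro a b; simp only [List.foldl_cons]; exact ih _ _

theorem pv_join_cons (bl : List Char) (x : List Char) (xs : List (List Char)) :
    PySem.Chars.join bl (x :: xs) = x ++ (xs.map (fun y => bl ++ y)).flatten := by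
  induction xs generalizing x with
  | nil => simp [PySem.Chars.join, List.intercalate]
  | cons y ys ih =>
    have h1 : PySem.Chars.join bl (x :: y :: ys) = x ++ (bl ++ PySem.Chars.join bl (y :: ys)) := by
      simp [PySem.Chars.join, List.intercalate, List.intersperse]
    rw [h1, ih y]
    simp

theorem pv_linesA_eq {α : Type} (w : Int) :
    ∀ (l : List α) (acc : List (List α)) (cur : List α),
      l.foldl (fun lines e =>
          let line := (PySem.List.pyGet? lines (-1)).getD []
          if (line.length : Int) ≥ w then lines ++ [[e]]
          else lines.dropLast ++ [line ++ [e]]) (acc ++ [cur])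
      = acc ++ pvCont w cur l := by
  intro l
  induction l with
  | nil => intro acc cur; simp [pvCont]
  | cons e t ih =>
    intro acc cur
    simp only [List.foldl_cons, pvCont]
    rw [PySem.List.pyGet?_neg_one]
    simp only [List.getLast?_concat, Option.getD_some, List.dropLast_concat]
    by_cases h : (cur.length : Int) ≥ w
    · rw [if_pos h, if_pos h]
      have h2 : acc ++ [cur] ++ [[e]] = (acc ++ [cur]) ++ [[e]] := by simp
      rw [h2, ih (acc ++ [cur]) [e]]
      simp
    · rw [if_neg h, if_neg h, ih acc (cur ++ [e])]

theorem pv_enum_fold (bl bg : List Char) (cell : String → List Char) :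
    ∀ (ls : List (List String)) (k : Int) (acc : List Char), 1 ≤ k →
      (PySem.List.enumerate ls k).foldl (fun ret il =>
          il.2.foldl (fun ret entry => ret ++ cell entry)
            ((if il.1 ≠ 0 then ret ++ bl else ret) ++ bg)) acc
      = acc ++ (ls.map (fun l => (bl ++ bg) ++ l.flatMap cell)).flatten := by
  intro ls
  induction ls with
  | nil => intro k acc hk; simp [PySem.List.enumerate]
  | cons x t ih =>
    intro k acc hk
    simp only [PySem.List.enumerate, List.foldl_cons]
    rw [if_pos (by omega : ¬ k = 0)]
    rw [PySem.List.foldl_append_eq_flatMap]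
    rw [ih (k + 1) ((acc ++ bl ++ bg) ++ x.flatMap cell) (by omega)]
    simp

theorem pv_main (strings : List String) (width : Int) (vertical : Bool) (length : Option Int) (begin : String) (between_lines : String) (hpre : 1 ≤ width) :
    show_list strings width vertical length begin between_lines
      = show_list_alt strings width vertical length begin between_lines := by
  lift width to ℕ using (by omega) with W hWcast
  have hW : 1 ≤ W := by exact_mod_cast hpre
  simp only [show_list, show_list_alt]
  rw [pv_foldl_pair
      (fun lines e => if (((PySem.List.pyGet? lines (-1)).getD []).length : Int) ≥ (W : Int)
                      then lines ++ [[e]]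
                      else lines.dropLast ++ [((PySem.List.pyGet? lines (-1)).getD []) ++ [e]])
      (fun m (e : String) => if e.toList.length > m then e.toList.length else m)]
  rw [show ([[]] : List (List String)) = [] ++ [[]] by simp]
  rw [pv_linesA_eq (W : Int) strings [] []]
  rw [pv_max_eq]
  rw [pv_cont_eq W hW strings [] (by simp)]
  rw [if_pos (by simpa using hW)]
  simp only [List.length_nil, Nat.sub_zero, List.nil_append]
  set len : Int := length.getD (((strings.map (fun s => s.toList.length)).foldl max 0 : Nat) : Int) with hlen
  set cell : String → List Char := fun entry =>
      pyLjust (if (entry.toList.length : Int) > len - 1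
               then PySem.Chars.slice entry.toList none (some (len - 4)) ++ "...".toList
               else entry.toList) len with hcell
  rw [pv_rows_eq W hW, pv_chunks_map]
  cases strings with
  | nil =>
    simp [pvChunks_nil, PySem.List.enumerate, PySem.Chars.join, List.intercalate]
  | cons x xs =>
    have hW' : W = (W - 1) + 1 := by omega
    have htake : List.take W (x::xs) = x :: List.take (W-1) xs := by
      conv_lhs => rw [hW', List.take_succ_cons]
    have hdrop : List.drop W (x::xs) = List.drop (W-1) xs := by
      conv_lhs => rw [hW', List.drop_succ_cons]
    rw [htake, hdrop, ← pvChunks_cons]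
    rw [show pvChunks W (x :: xs) = (x :: List.take (W-1) xs) :: pvChunks W (List.drop (W-1) xs) from pvChunks_cons _ _ _]
    simp only [List.nil_append, List.map_cons, List.isEmpty_cons]
    rw [if_neg (by simp)]
    rw [List.map_cons (f := fun (row : List (List Char)) => begin.toList ++ row.flatten)]
    rw [pv_join_cons]
    rw [show (PySem.List.enumerate ((x :: List.take (W-1) xs) :: pvChunks W (List.drop (W-1) xs))) = (0, x :: List.take (W-1) xs) :: PySem.List.enumerate (pvChunks W (List.drop (W-1) xs)) 1 from by simp [PySem.List.enumerate]]
    rw [List.foldl_cons]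
    rw [if_neg (by simp)]
    rw [PySem.List.foldl_append_eq_flatMap]
    rw [pv_enum_fold between_lines.toList begin.toList cell (pvChunks W (List.drop (W-1) xs)) 1 _ (by omega)]
    congr 1
    simp [hcell, List.flatMap_def, List.map_map, Function.comp_def, List.append_assoc]

-- ===== VERDICT (by name: the statement is the Claim_ definition above) =====
theorem show_list_spec : Claim_equal_show_list := by
  intro strings width vertical length begin between_lines hdom hpre
  exact pv_main strings width vertical length begin between_lines hpre
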